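-- pv_equiv track=rewrite | github.com/Randalix/rabbitviewer | core/heatmap.py | compute_heatmap
-- ===== SOURCE A (Python) =====
-- from typing import List, Set, Tuple
--
-- THUMB_RING_COUNT = 10
--
-- FULLRES_RING_COUNT = 4
--
-- BASE = 90
--
-- STEP = 5
--
-- FULLRES_OFFSET = 3
--
-- def compute_heatmap(
--     center_row: int,
--     center_col: int,
--     columns: int,
--     total_visible: int,
--     loaded_set: Set[int],
-- ) -> Tuple[List[Tuple[int, int]], List[Tuple[int, int]]]:
--     """Return ``(thumb_pairs, fullres_pairs)`` as ``[(visible_idx, priority), ...]``.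
--
--     *thumb_pairs* excludes indices in *loaded_set*; *fullres_pairs* does not.
--     Both lists are sorted by priority descending.
--     """
--     if columns <= 0 or total_visible <= 0:
--         return [], []
--
--     max_ring = max(THUMB_RING_COUNT, FULLRES_RING_COUNT)
--     total_rows = (total_visible + columns - 1) // columns
--
--     min_row = max(0, center_row - max_ring)
--     max_row = min(total_rows - 1, center_row + max_ring)
--     min_col = max(0, center_col - max_ring)
--     max_col = min(columns - 1, center_col + max_ring)
--
--     thumb_pairs: List[Tuple[int, int]] = []
--     fullres_pairs: List[Tuple[int, int]] = []
--
--     for r in range(min_row, max_row + 1):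
--         for c in range(min_col, max_col + 1):
--             vis_idx = r * columns + c
--             if vis_idx >= total_visible:
--                 continue
--
--             dist = abs(r - center_row) + abs(c - center_col)
--
--             if dist <= THUMB_RING_COUNT and vis_idx not in loaded_set:
--                 thumb_pairs.append((vis_idx, BASE - dist * STEP))
--
--             if dist <= FULLRES_RING_COUNT:
--                 fullres_pairs.append((vis_idx, BASE - (dist + FULLRES_OFFSET) * STEP))
--
--     thumb_pairs.sort(key=lambda t: -t[1])
--     fullres_pairs.sort(key=lambda t: -t[1])
--
--     return thumb_pairs, fullres_pairs
-- ===== SOURCE B (Python) =====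
-- from typing import List, Set, Tuple
--
-- THUMB_RING_COUNT = 10
--
-- FULLRES_RING_COUNT = 4
--
-- BASE = 90
--
-- STEP = 5
--
-- FULLRES_OFFSET = 3
--
--
-- def _ring(center_row, center_col, columns, total_visible, total_rows, d):
--     """Valid visible indices exactly at Manhattan distance d, row-major order."""
--     cells = []
--     for r in range(max(0, center_row - d), min(total_rows - 1, center_row + d) + 1):
--         rem = d - abs(r - center_row)
--         for c in ([center_col - rem, center_col + rem] if rem > 0 else [center_col]):
--             if 0 <= c < columns:
--                 vis = r * columns + c
--                 if vis < total_visible: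
--                     cells.append(vis)
--     return cells
--
--
-- def compute_heatmap(
--     center_row: int,
--     center_col: int,
--     columns: int,
--     total_visible: int,
--     loaded_set: Set[int],
-- ) -> Tuple[List[Tuple[int, int]], List[Tuple[int, int]]]:
--     """Enumerate diamond rings outward by distance; no rectangle scan and no sort:
--     rings at growing distance already come in descending priority, and cells within
--     a ring are produced in row-major order, matching the stable sort's tie order."""
--     if columns <= 0 or total_visible <= 0:
--         return [], []
--
--     total_rows = -(-total_visible // columns)
--
--     thumb_pairs = [
--         (v, BASE - d * STEP)
--         for d in range(THUMB_RING_COUNT + 1)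
--         for v in _ring(center_row, center_col, columns, total_visible, total_rows, d)
--         if v not in loaded_set
--     ]
--     fullres_pairs = [
--         (v, BASE - (d + FULLRES_OFFSET) * STEP)
--         for d in range(FULLRES_RING_COUNT + 1)
--         for v in _ring(center_row, center_col, columns, total_visible, total_rows, d)
--     ]
--     return thumb_pairs, fullres_pairs
-- ===== Notes on version B (the rewrite author's own statement) =====
-- stated objective: alternative
-- what changed: Replaces the rectangle scan plus comparison sort with direct outward enumeration of diamond rings: for each Manhattan distance d the ring's at-most-2 cells per row are generated explicitly in row-major order, so results come out already in descending-priority order with the stable sort's tie order and no sort or filter pass is needed.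
import Mathlib
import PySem

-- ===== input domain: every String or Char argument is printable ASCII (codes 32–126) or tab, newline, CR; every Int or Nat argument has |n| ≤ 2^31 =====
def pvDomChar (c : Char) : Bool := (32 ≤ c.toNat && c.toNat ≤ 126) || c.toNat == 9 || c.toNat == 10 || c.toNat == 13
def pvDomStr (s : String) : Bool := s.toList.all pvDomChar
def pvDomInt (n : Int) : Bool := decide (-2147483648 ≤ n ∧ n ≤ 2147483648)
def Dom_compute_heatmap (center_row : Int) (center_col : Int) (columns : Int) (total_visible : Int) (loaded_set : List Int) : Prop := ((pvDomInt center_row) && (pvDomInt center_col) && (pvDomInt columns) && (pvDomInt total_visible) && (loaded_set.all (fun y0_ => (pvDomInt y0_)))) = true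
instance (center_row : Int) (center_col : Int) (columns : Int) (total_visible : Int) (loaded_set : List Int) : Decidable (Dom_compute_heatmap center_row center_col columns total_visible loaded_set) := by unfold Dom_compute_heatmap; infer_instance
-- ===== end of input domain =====

-- B replaces A's rectangle scan + comparison sort by direct outward enumeration of the
-- diamond rings (at most two cells per row per distance), producing results already in
-- descending-priority, row-major-tie order; equality of the RETURN values is proved
-- (the Python A sorts fresh local lists, so no caller-visible mutation is involved).

-- ===== PORT A =====
def THUMB_RING_COUNT : Int := 10
def FULLRES_RING_COUNT : Int := 4
def BASE : Int := 90
def STEP : Int := 5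
def FULLRES_OFFSET : Int := 3

def compute_heatmap (center_row : Int) (center_col : Int) (columns : Int) (total_visible : Int) (loaded_set : List Int) : (List (Int × Int)) × (List (Int × Int)) :=
  if columns ≤ 0 ∨ total_visible ≤ 0 then ([], [])
  else
    let max_ring := max THUMB_RING_COUNT FULLRES_RING_COUNT
    let total_rows := PySem.Int.floordiv (total_visible + columns - 1) columns
    let min_row := max 0 (center_row - max_ring)
    let max_row := min (total_rows - 1) (center_row + max_ring)
    let min_col := max 0 (center_col - max_ring)
    let max_col := min (columns - 1) (center_col + max_ring)
    let pairs :=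
      (PySem.List.pyRange min_row (max_row + 1) 1).foldl (fun acc r =>
        (PySem.List.pyRange min_col (max_col + 1) 1).foldl (fun acc c =>
          let vis_idx := r * columns + c
          if vis_idx ≥ total_visible then acc
          else
            let dist := |r - center_row| + |c - center_col|
            let acc := if dist ≤ THUMB_RING_COUNT ∧ vis_idx ∉ loaded_set then
                (acc.1 ++ [(vis_idx, BASE - dist * STEP)], acc.2)
              else acc
            if dist ≤ FULLRES_RING_COUNT then
              (acc.1, acc.2 ++ [(vis_idx, BASE - (dist + FULLRES_OFFSET) * STEP)])
            else acc) acc)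
        (([], []) : List (Int × Int) × List (Int × Int))
    (PySem.List.sorted pairs.1 (fun t => -t.2) false,
     PySem.List.sorted pairs.2 (fun t => -t.2) false)

-- ===== PORT B =====
-- _ring(d): valid visible indices exactly at Manhattan distance d, row-major order
def pvRing (center_row : Int) (center_col : Int) (columns : Int) (total_visible : Int) (total_rows : Int) (d : Int) : List Int :=
  (PySem.List.pyRange (max 0 (center_row - d)) (min (total_rows - 1) (center_row + d) + 1) 1).foldl
    (fun cells r =>
      let rem := d - |r - center_row|
      (if rem > 0 then [center_col - rem, center_col + rem] else [center_col]).foldl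
        (fun cells c =>
          if 0 ≤ c ∧ c < columns then
            let vis := r * columns + c
            if vis < total_visible then cells ++ [vis] else cells
          else cells) cells) []

def compute_heatmap_alt (center_row : Int) (center_col : Int) (columns : Int) (total_visible : Int) (loaded_set : List Int) : (List (Int × Int)) × (List (Int × Int)) :=
  if columns ≤ 0 ∨ total_visible ≤ 0 then ([], [])
  else
    let total_rows := -(PySem.Int.floordiv (-total_visible) columns)
    ((PySem.List.pyRange 0 (THUMB_RING_COUNT + 1) 1).flatMap (fun d =>
        ((pvRing center_row center_col columns total_visible total_rows d).filter
            (fun v => decide (v ∉ loaded_set))).map (fun v => (v, BASE - d * STEP))),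
     (PySem.List.pyRange 0 (FULLRES_RING_COUNT + 1) 1).flatMap (fun d =>
        (pvRing center_row center_col columns total_visible total_rows d).map
          (fun v => (v, BASE - (d + FULLRES_OFFSET) * STEP))))

-- ===== PRECONDITION & SPEC =====
def Spec_compute_heatmap (center_row : Int) (center_col : Int) (columns : Int) (total_visible : Int) (loaded_set : List Int) (out : (List (Int × Int)) × (List (Int × Int))) : Prop := out = compute_heatmap_alt center_row center_col columns total_visible loaded_set
instance (center_row : Int) (center_col : Int) (columns : Int) (total_visible : Int) (loaded_set : List Int) (out : (List (Int × Int)) × (List (Int × Int))) : Decidable (Spec_compute_heatmap center_row center_col columns total_visible loaded_set out) := by unfold Spec_compute_heatmap; infer_instance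

-- ===== CLAIM (what is proved, stated in full; the proofs are below) =====
def Claim_equal_compute_heatmap : Prop := ∀ (center_row : Int) (center_col : Int) (columns : Int) (total_visible : Int) (loaded_set : List Int), Dom_compute_heatmap center_row center_col columns total_visible loaded_set → Spec_compute_heatmap center_row center_col columns total_visible loaded_set (compute_heatmap center_row center_col columns total_visible loaded_set)

-- ===== LEMMAS AND PROOFS =====


-- pair-fold to flatMap
theorem pvFoldPair {α β γ : Type} (f : α → List β) (g : α → List γ) :
    ∀ (l : List α) (p : List β × List γ),
      l.foldl (fun acc x => (acc.1 ++ f x, acc.2 ++ g x)) p = (p.1 ++ l.flatMap f, p.2 ++ l.flatMap g) := by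
  intro l
  induction l with
  | nil => intro p; simp
  | cons a l ih => intro p; simp [ih]

-- shrink a range-flatMap to a nested subrange outside which the function is nil
theorem pvShrink {α : Type} (f : Int → List α) (a b a' b' : Int) (ha : a ≤ a') (hb : b' ≤ b)
    (h : ∀ r, a ≤ r → r < b → ¬ (a' ≤ r ∧ r < b') → f r = []) :
    (PySem.List.pyRange a b 1).flatMap f = (PySem.List.pyRange a' b' 1).flatMap f := by
  by_cases hab : a' ≤ b' ∧ a ≤ b
  · rw [PySem.List.pyRange_one_append a a' b ha (by omega),
        PySem.List.pyRange_one_append a' b' b hab.1 hb]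
    simp only [List.flatMap_append]
    have h1 : (PySem.List.pyRange a a' 1).flatMap f = [] := by
      rw [List.flatMap_eq_nil_iff]
      intro r hr
      have := PySem.List.mem_pyRange_one.mp hr
      exact h r (by omega) (by omega) (by omega)
    have h2 : (PySem.List.pyRange b' b 1).flatMap f = [] := by
      rw [List.flatMap_eq_nil_iff]
      intro r hr
      have := PySem.List.mem_pyRange_one.mp hr
      exact h r (by omega) (by omega) (by omega)
    simp [h1, h2]
  · have h1 : (PySem.List.pyRange a b 1).flatMap f = [] := by
      rw [List.flatMap_eq_nil_iff]
      intro r hr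
      have := PySem.List.mem_pyRange_one.mp hr
      exact h r (by omega) (by omega) (by omega)
    have h2 : (PySem.List.pyRange a' b' 1).flatMap f = [] := by
      rw [List.flatMap_eq_nil_iff]
      intro r hr
      have := PySem.List.mem_pyRange_one.mp hr
      exact h r (by omega) (by omega) (by omega)
    rw [h1, h2]

-- flatMap over a range of a function supported at one point
theorem pvSingle {α : Type} (f : Int → List α) (a b x : Int)
    (h : ∀ r, a ≤ r → r < b → f r ≠ [] → r = x) :
    (PySem.List.pyRange a b 1).flatMap f = if a ≤ x ∧ x < b then f x else [] := by
  by_cases hx : a ≤ x ∧ x < b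
  · rw [if_pos hx, PySem.List.pyRange_one_append a x b hx.1 (by omega),
        PySem.List.pyRange_one_cons (by omega : x < b)]
    simp only [List.flatMap_append, List.flatMap_cons]
    have h1 : (PySem.List.pyRange a x 1).flatMap f = [] := by
      rw [List.flatMap_eq_nil_iff]
      intro r hr
      have := PySem.List.mem_pyRange_one.mp hr
      by_contra hne
      have := h r (by omega) (by omega) hne
      omega
    have h2 : (PySem.List.pyRange (x+1) b 1).flatMap f = [] := by
      rw [List.flatMap_eq_nil_iff]
      intro r hr
      have := PySem.List.mem_pyRange_one.mp hr
      by_contra hne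
      have := h r (by omega) (by omega) hne
      omega
    simp [h1, h2]
  · rw [if_neg hx, List.flatMap_eq_nil_iff]
    intro r hr
    have := PySem.List.mem_pyRange_one.mp hr
    by_contra hne
    have := h r (by omega) (by omega) hne
    omega

-- flatMap over a range of a function supported at two points x < y
theorem pvTwo {α : Type} (f : Int → List α) (a b x y : Int) (hxy : x < y)
    (h : ∀ r, a ≤ r → r < b → f r ≠ [] → r = x ∨ r = y) :
    (PySem.List.pyRange a b 1).flatMap f
      = (if a ≤ x ∧ x < b then f x else []) ++ (if a ≤ y ∧ y < b then f y else []) := by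
  by_cases hx : a ≤ x ∧ x < b
  · rw [PySem.List.pyRange_one_append a (x+1) b (by omega) (by omega)]
    simp only [List.flatMap_append]
    rw [pvSingle f a (x+1) x (by intro r h1 h2 h3; rcases h r (by omega) (by omega) h3 with h|h <;> omega)]
    rw [pvSingle f (x+1) b y (by intro r h1 h2 h3; rcases h r (by omega) (by omega) h3 with h|h <;> omega)]
    have : (x + 1 ≤ y ∧ y < b) ↔ (a ≤ y ∧ y < b) := by omega
    rw [if_pos (by omega : a ≤ x ∧ x < x + 1)]
    simp only [this, if_pos hx]
  · rw [pvSingle f a b y (by intro r h1 h2 h3; rcases h r (by omega) (by omega) h3 with h|h <;> omega)]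
    rw [if_neg hx]
    simp

-- == stable sort = concatenation of key-filters, and ceiling division ==
theorem pvInsertBy_append {α : Type} (bef : α → α → Bool) (x : α) (ys zs : List α)
    (h : ∀ y ∈ ys, bef x y = false) :
    PySem.List.insertBy bef x (ys ++ zs) = ys ++ PySem.List.insertBy bef x zs := by
  induction ys with
  | nil => simp
  | cons y ys ih =>
    have hy : bef x y = false := h y (by simp)
    simp [PySem.List.insertBy, hy]
    exact ih (fun y hy => h y (by simp [hy]))

theorem pvInsertBy_front {α : Type} (bef : α → α → Bool) (x : α) (ys : List α)
    (h : ∀ y ∈ ys, bef x y = true) :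
    PySem.List.insertBy bef x ys = x :: ys := by
  cases ys with
  | nil => simp [PySem.List.insertBy]
  | cons y ys => simp [PySem.List.insertBy, h y (by simp)]

theorem pvInsertFlat {α : Type} (key : α → Int) (x : α) :
    ∀ (ks : List Int), ks.Pairwise (· < ·) → key x ∈ ks →
    ∀ (B : Int → List α), (∀ k ∈ ks, ∀ y ∈ B k, key y = k) →
    PySem.List.insertBy (fun a b => decide (key a < key b)) x ((ks.map B).flatten)
      = (ks.map (fun k => B k ++ if key x = k then [x] else [])).flatten := by
  intro ks
  induction ks with
  | nil => intro _ hx; simp at hx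
  | cons k ks ih =>
    intro hp hx B hB
    have hlt : ∀ k' ∈ ks, k < k' := (List.pairwise_cons.mp hp).1
    simp only [List.map_cons, List.flatten_cons]
    by_cases hk : key x = k
    · have hB0 : ∀ y ∈ B k, (fun a b => decide (key a < key b)) x y = false := by
        intro y hy
        have := hB k (by simp) y hy
        simp [this, hk]
      rw [pvInsertBy_append _ _ _ _ hB0]
      have hfront : ∀ y ∈ (ks.map B).flatten, (fun a b => decide (key a < key b)) x y = true := by
        intro y hy
        obtain ⟨l, hl, hyl⟩ := List.mem_flatten.mp hy
        obtain ⟨k', hk', rfl⟩ := List.mem_map.mp hl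
        have := hB k' (by simp [hk']) y hyl
        simp [this, hk]
        exact hlt k' hk'
      rw [pvInsertBy_front _ _ _ hfront]
      have : (ks.map (fun k' => B k' ++ if key x = k' then [x] else [])) = ks.map B := by
        apply List.map_congr_left
        intro k' hk'
        have : key x ≠ k' := by have := hlt k' hk'; omega
        simp [this]
      rw [this, if_pos hk]
      simp
    · have hxk : key x ∈ ks := (List.mem_cons.mp hx).resolve_left hk
      have hB0 : ∀ y ∈ B k, (fun a b => decide (key a < key b)) x y = false := by
        intro y hy
        have h1 := hB k (by simp) y hy
        have h2 := hlt _ hxk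
        simp [h1]; omega
      rw [pvInsertBy_append _ _ _ _ hB0]
      rw [ih (List.pairwise_cons.mp hp).2 hxk B (fun k hk y hy => hB k (by simp [hk]) y hy)]
      simp [hk]

theorem pvSortedEq {α : Type} (key : α → Int) (ks : List Int) (hp : ks.Pairwise (· < ·)) :
    ∀ (xs : List α), (∀ x ∈ xs, key x ∈ ks) →
    PySem.List.sorted xs key false
      = (ks.map (fun k => xs.filter (fun y => decide (key y = k)))).flatten := by
  intro xs
  induction xs using List.reverseRecOn with
  | nil => intro _; simp [PySem.List.sorted_eq_foldl_insertBy]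
  | append_singleton xs x ih =>
    intro hall
    rw [PySem.List.sorted_eq_foldl_insertBy, List.foldl_append]
    simp only [List.foldl_cons, List.foldl_nil]
    rw [← PySem.List.sorted_eq_foldl_insertBy, ih (fun y hy => hall y (by simp [hy]))]
    rw [pvInsertFlat key x ks hp (hall x (by simp)) _
      (fun k _ y hy => by simpa using (List.mem_filter.mp hy).2)]
    congr 1
    apply List.map_congr_left
    intro k _
    simp only [List.filter_append]
    congr 1
    simp [List.filter]
    split_ifs <;> simp_all

theorem pvFilterNeg (l : List (Int × Int)) (k : Int) :
    l.filter (fun y => decide (-y.2 = -k)) = l.filter (fun y => decide (y.2 = k)) := by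
  apply List.filter_congr
  intro y _
  exact decide_eq_decide.mpr (by omega)

-- ceil(tv / c) two ways: -((-tv) // c) = (tv + c - 1) // c for 0 < c
theorem pvCeil (tv c : Int) (hc : 0 < c) :
    -(PySem.Int.floordiv (-tv) c) = PySem.Int.floordiv (tv + c - 1) c := by
  set q := PySem.Int.floordiv (tv + c - 1) c with hq
  have h1 := (PySem.Int.floordiv_eq_iff_of_pos (a := tv + c - 1) (b := c) (q := q) hc).mp hq.symm
  rw [PySem.Int.neg_floordiv_neg_eq_iff_of_pos (a := tv) (b := c) (q := q) hc]
  constructor <;> nlinarith [h1.1, h1.2]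

-- == characterizations of the two scans ==
def pvTCell (cr cc cols tv : Int) (loaded : List Int) (r c : Int) : List (Int × Int) :=
  if r * cols + c < tv ∧ |r - cr| + |c - cc| ≤ 10 ∧ r * cols + c ∉ loaded then
    [(r * cols + c, 90 - (|r - cr| + |c - cc|) * 5)] else []

def pvFCell (cr cc cols tv : Int) (r c : Int) : List (Int × Int) :=
  if r * cols + c < tv ∧ |r - cr| + |c - cc| ≤ 4 then
    [(r * cols + c, 90 - ((|r - cr| + |c - cc|) + 3) * 5)] else []

theorem pvScanEq (cr cc cols tv : Int) (loaded : List Int) (R C : List Int) :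
    R.foldl (fun acc r => C.foldl (fun acc c =>
        let vis_idx := r * cols + c
        if vis_idx ≥ tv then acc
        else
          let dist := |r - cr| + |c - cc|
          let acc := if dist ≤ THUMB_RING_COUNT ∧ vis_idx ∉ loaded then
              (acc.1 ++ [(vis_idx, BASE - dist * STEP)], acc.2)
            else acc
          if dist ≤ FULLRES_RING_COUNT then
            (acc.1, acc.2 ++ [(vis_idx, BASE - (dist + FULLRES_OFFSET) * STEP)])
          else acc) acc)
      (([], []) : List (Int × Int) × List (Int × Int))
    = (R.flatMap (fun r => C.flatMap (fun c => pvTCell cr cc cols tv loaded r c)),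
       R.flatMap (fun r => C.flatMap (fun c => pvFCell cr cc cols tv r c))) := by
  have hstep : ∀ r : Int, (fun (acc : List (Int × Int) × List (Int × Int)) c =>
        let vis_idx := r * cols + c
        if vis_idx ≥ tv then acc
        else
          let dist := |r - cr| + |c - cc|
          let acc := if dist ≤ THUMB_RING_COUNT ∧ vis_idx ∉ loaded then
              (acc.1 ++ [(vis_idx, BASE - dist * STEP)], acc.2)
            else acc
          if dist ≤ FULLRES_RING_COUNT then
            (acc.1, acc.2 ++ [(vis_idx, BASE - (dist + FULLRES_OFFSET) * STEP)])
          else acc)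
      = fun acc c => (acc.1 ++ pvTCell cr cc cols tv loaded r c, acc.2 ++ pvFCell cr cc cols tv r c) := by
    intro r
    funext acc c
    simp only [pvTCell, pvFCell, THUMB_RING_COUNT, FULLRES_RING_COUNT, BASE, STEP, FULLRES_OFFSET]
    split_ifs <;> simp_all <;> omega
  have houter : (fun (acc : List (Int × Int) × List (Int × Int)) r =>
        C.foldl (fun acc c => (acc.1 ++ pvTCell cr cc cols tv loaded r c, acc.2 ++ pvFCell cr cc cols tv r c)) acc)
      = fun acc r => (acc.1 ++ C.flatMap (fun c => pvTCell cr cc cols tv loaded r c),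
                      acc.2 ++ C.flatMap (fun c => pvFCell cr cc cols tv r c)) := by
    funext acc r
    exact pvFoldPair _ _ C acc
  simp only [hstep]
  rw [houter, pvFoldPair (fun r => C.flatMap (fun c => pvTCell cr cc cols tv loaded r c))
    (fun r => C.flatMap (fun c => pvFCell cr cc cols tv r c)) R ([], [])]
  simp

theorem pvRingEq (cr cc cols tv tr d : Int) :
    pvRing cr cc cols tv tr d
      = (PySem.List.pyRange (max 0 (cr - d)) (min (tr - 1) (cr + d) + 1) 1).flatMap (fun r =>
          (if d - |r - cr| > 0 then [cc - (d - |r - cr|), cc + (d - |r - cr|)] else [cc]).flatMap (fun c =>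
            if (0 ≤ c ∧ c < cols) ∧ r * cols + c < tv then [r * cols + c] else [])) := by
  unfold pvRing
  have hstep : ∀ r : Int, (fun (cells : List Int) c =>
        if 0 ≤ c ∧ c < cols then
          let vis := r * cols + c
          if vis < tv then cells ++ [vis] else cells
        else cells)
      = fun cells c => cells ++ (if (0 ≤ c ∧ c < cols) ∧ r * cols + c < tv then [r * cols + c] else []) := by
    intro r
    funext cells c
    split_ifs <;> simp_all
  simp only [hstep, PySem.List.foldl_append_eq_flatMap]
  simp

theorem pvFlatCongr {α β : Type} {l : List α} {f g : α → List β} (h : ∀ x ∈ l, f x = g x) :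
    l.flatMap f = l.flatMap g := by
  simp only [List.flatMap_def]
  rw [List.map_congr_left h]

-- the ±10 rectangle scan, restricted to cells at distance exactly d, IS the ring walk
theorem pvBridge {α : Type} (cr cc cols tv tr d : Int) (hd0 : 0 ≤ d) (hd : d ≤ 10) (g : Int → List α) :
    (PySem.List.pyRange (max 0 (cr - 10)) (min (tr - 1) (cr + 10) + 1) 1).flatMap (fun r =>
      (PySem.List.pyRange (max 0 (cc - 10)) (min (cols - 1) (cc + 10) + 1) 1).flatMap (fun c =>
        if |r - cr| + |c - cc| = d ∧ r * cols + c < tv then g (r * cols + c) else []))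
  = (PySem.List.pyRange (max 0 (cr - d)) (min (tr - 1) (cr + d) + 1) 1).flatMap (fun r =>
      (if d - |r - cr| > 0 then [cc - (d - |r - cr|), cc + (d - |r - cr|)] else [cc]).flatMap (fun c =>
        if (0 ≤ c ∧ c < cols) ∧ r * cols + c < tv then g (r * cols + c) else [])) := by
  rw [pvShrink _ _ _ (max 0 (cr - d)) (min (tr - 1) (cr + d) + 1) (by omega) (by omega) ?_]
  · apply pvFlatCongr
    intro r hr
    have hrm := PySem.List.mem_pyRange_one.mp hr
    have habr := abs_choice (r - cr)
    have habr0 := abs_nonneg (r - cr)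
    by_cases h0 : d - |r - cr| > 0
    · rw [if_pos h0]
      have hxy : cc - (d - |r - cr|) < cc + (d - |r - cr|) := by omega
      rw [pvTwo _ _ _ _ _ hxy ?_]
      · simp only [List.flatMap_cons, List.flatMap_nil, List.append_nil]
        have habx := abs_choice (cc - (d - |r - cr|) - cc)
        have habx0 := abs_nonneg (cc - (d - |r - cr|) - cc)
        have haby := abs_choice (cc + (d - |r - cr|) - cc)
        have haby0 := abs_nonneg (cc + (d - |r - cr|) - cc)
        congr 1
        · split_ifs <;> first | rfl | omega
        · split_ifs <;> first | rfl | omega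
      · intro c h1 h2 h3
        have habc := abs_choice (c - cc)
        have habc0 := abs_nonneg (c - cc)
        by_contra hne
        apply h3
        split_ifs with hcond
        · exfalso; omega
        · rfl
    · rw [if_neg h0]
      have habx : |cc - cc| = (0 : Int) := by simp
      rw [pvSingle _ _ _ cc ?_]
      · simp only [List.flatMap_cons, List.flatMap_nil, List.append_nil]
        split_ifs <;> first | rfl | omega
      · intro c h1 h2 h3
        have habc := abs_choice (c - cc)
        have habc0 := abs_nonneg (c - cc)
        by_contra hne
        apply h3
        split_ifs with hcond
        · exfalso; omega
        · rfl
  · intro r h1 h2 h3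
    have habr := abs_choice (r - cr)
    have habr0 := abs_nonneg (r - cr)
    rw [List.flatMap_eq_nil_iff]
    intro c hc
    have habc0 := abs_nonneg (c - cc)
    split_ifs with hcond
    · exfalso; omega
    · rfl

-- distance-d slice of the thumb scan = loaded-filtered ring d with its priority attached
theorem pvThumbD (cr cc cols tv tr : Int) (loaded : List Int) (d p : Int)
    (hd0 : 0 ≤ d) (hd : d ≤ 10) (hp : p = 90 - d * 5) :
    ((PySem.List.pyRange (max 0 (cr - 10)) (min (tr - 1) (cr + 10) + 1) 1).flatMap (fun r =>
      (PySem.List.pyRange (max 0 (cc - 10)) (min (cols - 1) (cc + 10) + 1) 1).flatMap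
        (fun c => pvTCell cr cc cols tv loaded r c))).filter (fun y => decide (y.2 = p))
  = ((pvRing cr cc cols tv tr d).filter (fun v => decide (v ∉ loaded))).map
      (fun v => (v, 90 - d * 5)) := by
  rw [pvRingEq, List.filter_flatMap, List.filter_flatMap, List.map_flatMap]
  have hL : ∀ r c : Int,
      ((pvTCell cr cc cols tv loaded r c).filter (fun y => decide (y.2 = p)))
        = (fun c => if |r - cr| + |c - cc| = d ∧ r * cols + c < tv then
            (if r * cols + c ∉ loaded then [(r * cols + c, 90 - d * 5)] else []) else []) c := by
    intro r c
    have h0 := abs_nonneg (r - cr)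
    have h1 := abs_nonneg (c - cc)
    simp only [pvTCell]
    split_ifs <;> simp_all
  have hR : ∀ r c : Int,
      ((((if (0 ≤ c ∧ c < cols) ∧ r * cols + c < tv then [r * cols + c] else []).filter
          (fun v => decide (v ∉ loaded))).map (fun v => (v, 90 - d * 5))))
        = (fun c => if (0 ≤ c ∧ c < cols) ∧ r * cols + c < tv then
            (if r * cols + c ∉ loaded then [(r * cols + c, 90 - d * 5)] else []) else []) c := by
    intro r c
    by_cases hm : r * cols + c ∈ loaded <;> split_ifs <;> simp_all
  calc _ = (PySem.List.pyRange (max 0 (cr - 10)) (min (tr - 1) (cr + 10) + 1) 1).flatMap (fun r =>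
      (PySem.List.pyRange (max 0 (cc - 10)) (min (cols - 1) (cc + 10) + 1) 1).flatMap
        (fun c => if |r - cr| + |c - cc| = d ∧ r * cols + c < tv then
            (if r * cols + c ∉ loaded then [(r * cols + c, 90 - d * 5)] else []) else [])) := by
        apply pvFlatCongr; intro r _; rw [List.filter_flatMap]; apply pvFlatCongr; intro c _
        exact hL r c
    _ = _ := by
        rw [pvBridge cr cc cols tv tr d hd0 hd
          (fun v => if v ∉ loaded then [(v, 90 - d * 5)] else [])]
        apply pvFlatCongr; intro r _
        rw [List.filter_flatMap, List.map_flatMap]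
        apply pvFlatCongr; intro c _
        exact (hR r c).symm

-- distance-d slice of the fullres scan = ring d with its priority attached
theorem pvFullD (cr cc cols tv tr : Int) (d p : Int)
    (hd0 : 0 ≤ d) (hd : d ≤ 4) (hp : p = 90 - (d + 3) * 5) :
    ((PySem.List.pyRange (max 0 (cr - 10)) (min (tr - 1) (cr + 10) + 1) 1).flatMap (fun r =>
      (PySem.List.pyRange (max 0 (cc - 10)) (min (cols - 1) (cc + 10) + 1) 1).flatMap
        (fun c => pvFCell cr cc cols tv r c))).filter (fun y => decide (y.2 = p))
  = (pvRing cr cc cols tv tr d).map (fun v => (v, 90 - (d + 3) * 5)) := by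
  rw [pvRingEq, List.filter_flatMap, List.map_flatMap]
  have hL : ∀ r c : Int,
      ((pvFCell cr cc cols tv r c).filter (fun y => decide (y.2 = p)))
        = (fun c => if |r - cr| + |c - cc| = d ∧ r * cols + c < tv then
            [(r * cols + c, 90 - (d + 3) * 5)] else []) c := by
    intro r c
    have h0 := abs_nonneg (r - cr)
    have h1 := abs_nonneg (c - cc)
    simp only [pvFCell]
    split_ifs <;> simp_all
  calc _ = (PySem.List.pyRange (max 0 (cr - 10)) (min (tr - 1) (cr + 10) + 1) 1).flatMap (fun r =>
      (PySem.List.pyRange (max 0 (cc - 10)) (min (cols - 1) (cc + 10) + 1) 1).flatMap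
        (fun c => if |r - cr| + |c - cc| = d ∧ r * cols + c < tv then
            [(r * cols + c, 90 - (d + 3) * 5)] else [])) := by
        apply pvFlatCongr; intro r _; rw [List.filter_flatMap]; apply pvFlatCongr; intro c _
        exact hL r c
    _ = _ := by
        rw [pvBridge cr cc cols tv tr d hd0 (by omega)
          (fun v => [(v, 90 - (d + 3) * 5)])]
        apply pvFlatCongr; intro r _
        rw [List.map_flatMap]
        apply pvFlatCongr; intro c _
        split_ifs <;> simp_all

-- every thumb-scan priority is one of 90,85,…,40 (negated for the sort key)
theorem pvMemT (cr cc cols tv : Int) (loaded : List Int) (R C : List Int) :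
    ∀ x ∈ R.flatMap (fun r => C.flatMap (fun c => pvTCell cr cc cols tv loaded r c)),
      (fun t : Int × Int => -t.2) x ∈ ([-90, -85, -80, -75, -70, -65, -60, -55, -50, -45, -40] : List Int) := by
  intro x hx
  obtain ⟨r, _, hx⟩ := List.mem_flatMap.mp hx
  obtain ⟨c, _, hx⟩ := List.mem_flatMap.mp hx
  simp only [pvTCell] at hx
  have h0 := abs_nonneg (r - cr)
  have h1 := abs_nonneg (c - cc)
  split_ifs at hx with h
  · simp only [List.mem_singleton] at hx
    subst hx
    simp only [List.mem_cons, List.not_mem_nil, or_false]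
    omega
  · simp at hx

theorem pvMemF (cr cc cols tv : Int) (R C : List Int) :
    ∀ x ∈ R.flatMap (fun r => C.flatMap (fun c => pvFCell cr cc cols tv r c)),
      (fun t : Int × Int => -t.2) x ∈ ([-75, -70, -65, -60, -55] : List Int) := by
  intro x hx
  obtain ⟨r, _, hx⟩ := List.mem_flatMap.mp hx
  obtain ⟨c, _, hx⟩ := List.mem_flatMap.mp hx
  simp only [pvFCell] at hx
  have h0 := abs_nonneg (r - cr)
  have h1 := abs_nonneg (c - cc)
  split_ifs at hx with h
  · simp only [List.mem_singleton] at hx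
    subst hx
    simp only [List.mem_cons, List.not_mem_nil, or_false]
    omega
  · simp at hx

theorem pvMain (cr cc cols tv : Int) (loaded : List Int) (hc : 0 < cols) (htv : 0 < tv) :
    compute_heatmap cr cc cols tv loaded = compute_heatmap_alt cr cc cols tv loaded := by
  have hg : ¬(cols ≤ 0 ∨ tv ≤ 0) := by omega
  have htr := pvCeil tv cols hc
  set tr := PySem.Int.floordiv (tv + cols - 1) cols with htrdef
  have hA : compute_heatmap cr cc cols tv loaded =
      (PySem.List.sorted ((PySem.List.pyRange (max 0 (cr - 10)) (min (tr - 1) (cr + 10) + 1) 1).flatMap (fun r =>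
          (PySem.List.pyRange (max 0 (cc - 10)) (min (cols - 1) (cc + 10) + 1) 1).flatMap
            (fun c => pvTCell cr cc cols tv loaded r c))) (fun t => -t.2) false,
       PySem.List.sorted ((PySem.List.pyRange (max 0 (cr - 10)) (min (tr - 1) (cr + 10) + 1) 1).flatMap (fun r =>
          (PySem.List.pyRange (max 0 (cc - 10)) (min (cols - 1) (cc + 10) + 1) 1).flatMap
            (fun c => pvFCell cr cc cols tv r c))) (fun t => -t.2) false) := by
    have h1 := pvScanEq cr cc cols tv loaded
      (PySem.List.pyRange (max 0 (cr - 10)) (min (tr - 1) (cr + 10) + 1) 1)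
      (PySem.List.pyRange (max 0 (cc - 10)) (min (cols - 1) (cc + 10) + 1) 1)
    unfold compute_heatmap
    rw [if_neg hg]
    exact congrArg (fun s : List (Int × Int) × List (Int × Int) =>
      (PySem.List.sorted s.1 (fun t => -t.2) false, PySem.List.sorted s.2 (fun t => -t.2) false)) h1
  have hB : compute_heatmap_alt cr cc cols tv loaded =
      ((PySem.List.pyRange 0 (THUMB_RING_COUNT + 1) 1).flatMap (fun d =>
          ((pvRing cr cc cols tv tr d).filter (fun v => decide (v ∉ loaded))).map
            (fun v => (v, BASE - d * STEP))),
       (PySem.List.pyRange 0 (FULLRES_RING_COUNT + 1) 1).flatMap (fun d =>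
          (pvRing cr cc cols tv tr d).map (fun v => (v, BASE - (d + FULLRES_OFFSET) * STEP)))) := by
    unfold compute_heatmap_alt
    rw [if_neg hg]
    exact congrArg (fun t =>
      ((PySem.List.pyRange 0 (THUMB_RING_COUNT + 1) 1).flatMap (fun d =>
          ((pvRing cr cc cols tv t d).filter (fun v => decide (v ∉ loaded))).map
            (fun v => (v, BASE - d * STEP))),
       (PySem.List.pyRange 0 (FULLRES_RING_COUNT + 1) 1).flatMap (fun d =>
          (pvRing cr cc cols tv t d).map (fun v => (v, BASE - (d + FULLRES_OFFSET) * STEP))))) htr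
  rw [hA, hB]
  have hrT : PySem.List.pyRange 0 (THUMB_RING_COUNT + 1) 1
      = ([0, 1, 2, 3, 4, 5, 6, 7, 8, 9, 10] : List Int) := by decide
  have hrF : PySem.List.pyRange 0 (FULLRES_RING_COUNT + 1) 1
      = ([0, 1, 2, 3, 4] : List Int) := by decide
  refine Prod.ext ?_ ?_
  · rw [pvSortedEq (fun t : Int × Int => -t.2)
      ([-90, -85, -80, -75, -70, -65, -60, -55, -50, -45, -40] : List Int) (by decide)
      _ (pvMemT cr cc cols tv loaded _ _)]
    simp only [hrT, List.map_cons, List.map_nil, List.flatten_cons, List.flatten_nil,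
      List.flatMap_cons, List.flatMap_nil, BASE, STEP]
    rw [pvFilterNeg _ 90, pvFilterNeg _ 85, pvFilterNeg _ 80, pvFilterNeg _ 75, pvFilterNeg _ 70,
        pvFilterNeg _ 65, pvFilterNeg _ 60, pvFilterNeg _ 55, pvFilterNeg _ 50, pvFilterNeg _ 45,
        pvFilterNeg _ 40]
    rw [pvThumbD cr cc cols tv tr loaded 0 90 (by norm_num) (by norm_num) (by norm_num),
        pvThumbD cr cc cols tv tr loaded 1 85 (by norm_num) (by norm_num) (by norm_num),
        pvThumbD cr cc cols tv tr loaded 2 80 (by norm_num) (by norm_num) (by norm_num),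
        pvThumbD cr cc cols tv tr loaded 3 75 (by norm_num) (by norm_num) (by norm_num),
        pvThumbD cr cc cols tv tr loaded 4 70 (by norm_num) (by norm_num) (by norm_num),
        pvThumbD cr cc cols tv tr loaded 5 65 (by norm_num) (by norm_num) (by norm_num),
        pvThumbD cr cc cols tv tr loaded 6 60 (by norm_num) (by norm_num) (by norm_num),
        pvThumbD cr cc cols tv tr loaded 7 55 (by norm_num) (by norm_num) (by norm_num),
        pvThumbD cr cc cols tv tr loaded 8 50 (by norm_num) (by norm_num) (by norm_num),
        pvThumbD cr cc cols tv tr loaded 9 45 (by norm_num) (by norm_num) (by norm_num),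
        pvThumbD cr cc cols tv tr loaded 10 40 (by norm_num) (by norm_num) (by norm_num)]
  · rw [pvSortedEq (fun t : Int × Int => -t.2)
      ([-75, -70, -65, -60, -55] : List Int) (by decide)
      _ (pvMemF cr cc cols tv _ _)]
    simp only [hrF, List.map_cons, List.map_nil, List.flatten_cons, List.flatten_nil,
      List.flatMap_cons, List.flatMap_nil, BASE, STEP, FULLRES_OFFSET]
    rw [pvFilterNeg _ 75, pvFilterNeg _ 70, pvFilterNeg _ 65, pvFilterNeg _ 60, pvFilterNeg _ 55]
    rw [pvFullD cr cc cols tv tr 0 75 (by norm_num) (by norm_num) (by norm_num),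
        pvFullD cr cc cols tv tr 1 70 (by norm_num) (by norm_num) (by norm_num),
        pvFullD cr cc cols tv tr 2 65 (by norm_num) (by norm_num) (by norm_num),
        pvFullD cr cc cols tv tr 3 60 (by norm_num) (by norm_num) (by norm_num),
        pvFullD cr cc cols tv tr 4 55 (by norm_num) (by norm_num) (by norm_num)]


-- ===== VERDICT (by name: the statement is the Claim_ definition above) =====
theorem compute_heatmap_spec : Claim_equal_compute_heatmap := by
  intro cr cc cols tv loaded _
  unfold Spec_compute_heatmap
  by_cases hg : cols ≤ 0 ∨ tv ≤ 0
  · unfold compute_heatmap compute_heatmap_alt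
    rw [if_pos hg, if_pos hg]
  · exact pvMain cr cc cols tv loaded (by omega) (by omega)
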